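-- pv_equiv track=rewrite | github.com/sahithsundarw/sentinel | update_readme_results.py | add_colab_badge
-- ===== SOURCE A (Python) =====
-- COLAB_BADGE = (
--     "[![Open In Colab](https://colab.research.google.com/assets/colab-badge.svg)]"
--     "(https://colab.research.google.com/github/sahithsundarw/sentinel/blob/main/training_colab.ipynb)"
-- )
--
-- def add_colab_badge(content: str) -> tuple[str, bool]:
--     """Add Colab badge after the first H1 heading if not already present."""
--     if "colab-badge.svg" in content:
--         return content, False
--
--     # Find first H1
--     lines = content.split("\n")
--     new_lines = []
--     inserted = False
--     for i, line in enumerate(lines):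
--         new_lines.append(line)
--         if not inserted and line.startswith("# "):
--             new_lines.append("")
--             new_lines.append(COLAB_BADGE)
--             new_lines.append("")
--             inserted = True
--     return "\n".join(new_lines), inserted
-- ===== SOURCE B (Python) =====
-- COLAB_BADGE = (
--     "[![Open In Colab](https://colab.research.google.com/assets/colab-badge.svg)]"
--     "(https://colab.research.google.com/github/sahithsundarw/sentinel/blob/main/training_colab.ipynb)"
-- )
--
-- def add_colab_badge(content: str) -> tuple[str, bool]:
--     """Add Colab badge after the first H1 heading if not already present."""
--     if "colab-badge.svg" in content:
--         return content, False
--     lines = content.split("\n")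
--     i = next((j for j, line in enumerate(lines) if line.startswith("# ")), None)
--     if i is None:
--         return "\n".join(lines), False
--     return "\n".join(lines[:i + 1] + ["", COLAB_BADGE, ""] + lines[i + 1:]), True
-- ===== Notes on version B (the rewrite author's own statement) =====
-- stated objective: simpler
-- what changed: Replaces A's accumulate-and-latch loop (growing a new_lines list with an inserted flag) by locating the first H1 index with next/enumerate and splicing the badge in with list slices.
import Mathlib
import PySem

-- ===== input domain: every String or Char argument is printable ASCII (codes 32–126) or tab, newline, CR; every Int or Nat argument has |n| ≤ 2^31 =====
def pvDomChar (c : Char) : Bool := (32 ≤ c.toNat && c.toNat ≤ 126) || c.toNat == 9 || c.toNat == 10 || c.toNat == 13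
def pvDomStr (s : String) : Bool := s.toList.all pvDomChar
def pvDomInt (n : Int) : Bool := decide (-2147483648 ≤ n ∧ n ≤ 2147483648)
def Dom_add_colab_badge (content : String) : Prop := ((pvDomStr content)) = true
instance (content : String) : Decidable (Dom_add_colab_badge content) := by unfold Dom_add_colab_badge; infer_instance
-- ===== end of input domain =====

-- B replaces A's accumulate-and-latch loop by a find-the-first-H1-index step and a list splice (objective: simpler).

def COLAB_BADGE : String :=
  "[![Open In Colab](https://colab.research.google.com/assets/colab-badge.svg)](https://colab.research.google.com/github/sahithsundarw/sentinel/blob/main/training_colab.ipynb)"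

-- ===== PORT A =====
def add_colab_badge (content : String) : String × Bool :=
  if PySem.Str.isIn "colab-badge.svg" content then (content, false)
  else
    -- content.split("\n"): the separator "\n" is a non-empty literal, so split? is always `some`
    let lines := (PySem.Str.split? content "\n").getD []
    let st := lines.foldl
      (fun (st : List String × Bool) line =>
        if !st.2 && PySem.Str.startswith line "# " then
          (st.1 ++ [line] ++ ["", COLAB_BADGE, ""], true)
        else (st.1 ++ [line], st.2)) ([], false)
    (PySem.Str.join "\n" st.1, st.2)

-- ===== PORT B =====
def add_colab_badge_alt (content : String) : String × Bool :=
  if PySem.Str.isIn "colab-badge.svg" content then (content, false)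
  else
    let lines := (PySem.Str.split? content "\n").getD []
    -- next((j for j, line in enumerate(lines) if line.startswith("# ")), None)
    match lines.findIdx? (fun line => PySem.Str.startswith line "# ") with
    | none => (PySem.Str.join "\n" lines, false)
    | some i =>
        (PySem.Str.join "\n" (lines.take (i + 1) ++ ["", COLAB_BADGE, ""] ++ lines.drop (i + 1)), true)

-- ===== PRECONDITION & SPEC =====
def Spec_add_colab_badge (content : String) (out : String × Bool) : Prop := out = add_colab_badge_alt content
instance (content : String) (out : String × Bool) : Decidable (Spec_add_colab_badge content out) := by unfold Spec_add_colab_badge; infer_instance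

-- ===== CLAIM (what is proved, stated in full; the proofs are below) =====
def Claim_equal_add_colab_badge : Prop := ∀ (content : String), Dom_add_colab_badge content → Spec_add_colab_badge content (add_colab_badge content)

-- ===== LEMMAS AND PROOFS =====

-- Once the latch is set, A's loop only appends the remaining lines.
lemma fold_latched (lines acc : List String) :
    lines.foldl
      (fun (st : List String × Bool) line =>
        if !st.2 && PySem.Str.startswith line "# " then
          (st.1 ++ [line] ++ ["", COLAB_BADGE, ""], true)
        else (st.1 ++ [line], st.2)) (acc, true) = (acc ++ lines, true) := by
  induction lines generalizing acc with
  | nil => simp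
  | cons l ls ih => simpa using ih (acc ++ [l])

-- Before the latch, A's loop is: find the first H1 and splice the badge in after it.
lemma fold_unlatched (lines acc : List String) :
    lines.foldl
      (fun (st : List String × Bool) line =>
        if !st.2 && PySem.Str.startswith line "# " then
          (st.1 ++ [line] ++ ["", COLAB_BADGE, ""], true)
        else (st.1 ++ [line], st.2)) (acc, false) =
      match lines.findIdx? (fun line => PySem.Str.startswith line "# ") with
      | none => (acc ++ lines, false)
      | some i => (acc ++ (lines.take (i + 1) ++ ["", COLAB_BADGE, ""] ++ lines.drop (i + 1)), true) := by
  induction lines generalizing acc with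
  | nil => simp
  | cons l ls ih =>
    cases h : PySem.Str.startswith l "# " with
    | true =>
      simp only [List.foldl_cons, Bool.not_false, Bool.true_and, h, if_true]
      rw [fold_latched]
      have h' : PySem.Chars.startswith l.toList ['#', ' '] = true := by simpa using h
      simp [List.findIdx?_cons, h']
    | false =>
      simp only [List.foldl_cons, Bool.not_false, Bool.true_and, h, Bool.false_eq_true, if_false]
      rw [ih (acc ++ [l])]
      simp only [List.findIdx?_cons, h, Bool.false_eq_true, if_false]
      cases ls.findIdx? (fun line => PySem.Str.startswith line "# ") <;> simp

-- ===== VERDICT (by name: the statement is the Claim_ definition above) =====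
theorem add_colab_badge_spec : Claim_equal_add_colab_badge := by
  intro content _
  unfold Spec_add_colab_badge add_colab_badge add_colab_badge_alt
  by_cases hg : PySem.Str.isIn "colab-badge.svg" content = true
  · rw [if_pos hg, if_pos hg]
  · rw [if_neg hg, if_neg hg]
    simp only [fold_unlatched]
    cases h : ((PySem.Str.split? content "\n").getD []).findIdx?
        (fun line => PySem.Str.startswith line "# ") <;> simp
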